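-- pv_equiv track=rewrite | github.com/pypi-data/pypi-mirror-340 | packages/otauto/otauto-0.6.7-py3-none-any.whl/game_control/old_versions/task/task_execution.py | merge_keys
-- ===== SOURCE A (Python) =====
-- def merge_keys(data):
--     keys = list(data.keys())
--     merged_keys = []
--
--     for i in range(len(keys)):
--         for j in range(i + 1, len(keys)):
--             # 获取y1的值
--             y1_1 = data[keys[i]][0][1]  # 获取第一个值的第二个元素
--             y1_2 = data[keys[j]][0][1]  # 获取第二个值的第二个元素
--
--             # 检查差值
--             if abs(y1_1 - y1_2) < 6:
--                 merged_keys.append((keys[i], keys[j]))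
--
--     return merged_keys
-- ===== SOURCE B (Python) =====
-- def merge_keys(data):
--     keys = list(data.keys())
--     order = sorted((vals[0][1], idx) for idx, vals in enumerate(data.values()))
--     pairs = []
--     m = len(order)
--     for p in range(m):
--         yp, ip = order[p]
--         q = p + 1
--         while q < m and order[q][0] - yp < 6:
--             iq = order[q][1]
--             pairs.append((ip, iq) if ip < iq else (iq, ip))
--             q += 1
--     pairs.sort()
--     return [(keys[i], keys[j]) for i, j in pairs]
-- ===== Notes on version B (the rewrite author's own statement) =====
-- stated objective: alternative
-- what changed: Replaced the all-index-pairs double loop (two dict lookups per comparison) by a different algorithm: sort entries by y once, emit candidate pairs from a sliding y-window over the sorted order, then sort the emitted index pairs lexicographically to restore A's (i,j) output order; its cost is O(n log n + k log k) in the number k of emitted pairs, while A always scans all n^2/2 index pairs.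
-- outside the precondition, e.g. on merge_keys({'': []}): A returns [], B raises IndexError
import Mathlib
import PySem

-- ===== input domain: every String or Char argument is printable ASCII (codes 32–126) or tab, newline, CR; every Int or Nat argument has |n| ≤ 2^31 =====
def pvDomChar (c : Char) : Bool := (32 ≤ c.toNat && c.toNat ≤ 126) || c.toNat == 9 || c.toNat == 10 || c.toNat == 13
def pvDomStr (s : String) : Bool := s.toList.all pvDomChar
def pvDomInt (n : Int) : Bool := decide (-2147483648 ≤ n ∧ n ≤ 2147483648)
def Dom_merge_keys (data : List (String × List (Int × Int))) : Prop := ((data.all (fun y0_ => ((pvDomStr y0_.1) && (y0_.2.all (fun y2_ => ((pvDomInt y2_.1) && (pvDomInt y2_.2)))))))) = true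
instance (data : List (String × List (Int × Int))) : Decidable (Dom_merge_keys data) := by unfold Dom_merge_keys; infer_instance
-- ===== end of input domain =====

-- B replaces A's all-pairs double loop by a different algorithm: sort-by-y + a sliding window over the
-- sorted order, then a lexicographic sort of the found index pairs to restore A's (i,j) output order
-- (objective: alternative; cost O(n log n + k log k) in the number k of emitted pairs).

-- ===== PORT A =====
def merge_keys (data : List (String × List (Int × Int))) : List (String × String) :=
  let d := PySem.Dict.mk data
  let keys := d.keys
  let n : Int := (keys.length : Int)
  (PySem.List.pyRange 0 n 1).foldl (fun acc i =>
    (PySem.List.pyRange (i + 1) n 1).foldl (fun acc j =>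
      let y1_1 := (PySem.List.pyGetD (d.getD (PySem.List.pyGetD keys i "") []) 0 (0, 0)).2
      let y1_2 := (PySem.List.pyGetD (d.getD (PySem.List.pyGetD keys j "") []) 0 (0, 0)).2
      if |y1_1 - y1_2| < 6 then acc ++ [(PySem.List.pyGetD keys i "", PySem.List.pyGetD keys j "")] else acc) acc) []

-- ===== PORT B =====
-- '(ip, iq) if ip < iq else (iq, ip)'
def pvNorm (ip iq : Int) : Int × Int := if ip < iq then (ip, iq) else (iq, ip)

-- the inner 'while q < m and order[q][0] - yp < 6' walk over the suffix of the sorted order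
def pvInner (yp ip : Int) : List (Int × Int) → List (Int × Int)
  | [] => []
  | (yq, iq) :: rest => if 6 ≤ yq - yp then [] else pvNorm ip iq :: pvInner yp ip rest

-- the outer 'for p in range(m)' loop: window starting after each position
def pvOuter : List (Int × Int) → List (Int × Int)
  | [] => []
  | (yp, ip) :: rest => pvInner yp ip rest ++ pvOuter rest

def merge_keys_alt (data : List (String × List (Int × Int))) : List (String × String) :=
  let keys := (PySem.Dict.mk data).keys
  let order := PySem.List.sorted2
    ((PySem.List.enumerate (data.map (·.2))).map (fun p => ((PySem.List.pyGetD p.2 0 (0, 0)).2, p.1)))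
    Prod.fst Prod.snd
  let pairs := pvOuter order
  let spairs := PySem.List.sorted2 pairs Prod.fst Prod.snd
  spairs.map (fun ij => (PySem.List.pyGetD keys ij.1 "", PySem.List.pyGetD keys ij.2 ""))

-- ===== PRECONDITION & SPEC =====
-- Pre_ excludes (a) association lists with duplicate keys — a Python dict cannot have them, so they
-- correspond to no real input of A — and (b) entries whose value list is empty, on which A raises
-- IndexError whenever it has two or more keys; with fewer than two keys A's loops never run and it
-- returns an empty result while B (which reads every value up front) still raises, so those are excluded too.
def Pre_merge_keys (data : List (String × List (Int × Int))) : Prop :=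
  (data.map (·.1)).Nodup ∧ ∀ kv ∈ data, kv.2 ≠ []
instance (data : List (String × List (Int × Int))) : Decidable (Pre_merge_keys data) := by
  unfold Pre_merge_keys; infer_instance

def pvWitness_merge_keys : (List (String × List (Int × Int))) :=
  [("a", [(0, 3)]), ("b", [(1, 10)]), ("c", [(2, 5)])]

def Spec_merge_keys (data : List (String × List (Int × Int))) (out : List (String × String)) : Prop := out = merge_keys_alt data
instance (data : List (String × List (Int × Int))) (out : List (String × String)) : Decidable (Spec_merge_keys data out) := by unfold Spec_merge_keys; infer_instance

-- ===== CLAIM (what is proved, stated in full; the proofs are below) =====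
def Claim_equal_merge_keys : Prop := ∀ (data : List (String × List (Int × Int))), Dom_merge_keys data → Pre_merge_keys data → Spec_merge_keys data (merge_keys data)

-- ===== LEMMAS AND PROOFS =====

-- y-values of the entries, in order; pvYN reads them by Python index
def pvYs (data : List (String × List (Int × Int))) : List Int :=
  data.map (fun kv => (PySem.List.pyGetD kv.2 0 (0, 0)).2)
def pvYN (data : List (String × List (Int × Int))) (i : Int) : Int :=
  PySem.List.pyGetD (pvYs data) i 0
-- all index pairs (i, j), 0 ≤ i < j < n, in A's emission (lexicographic) order
def pvAllPairs (n : Int) : List (Int × Int) :=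
  (PySem.List.pyRange 0 n 1).flatMap (fun i => (PySem.List.pyRange (i + 1) n 1).map (fun j => (i, j)))
-- the close pairs, in A's order
def pvF (data : List (String × List (Int × Int))) : List (Int × Int) :=
  (pvAllPairs data.length).filter (fun p => decide (|pvYN data p.1 - pvYN data p.2| < 6))
-- index pair to key pair
def pvG (data : List (String × List (Int × Int))) (ij : Int × Int) : String × String :=
  (PySem.List.pyGetD (data.map (·.1)) ij.1 "", PySem.List.pyGetD (data.map (·.1)) ij.2 "")
-- the (y, index) list that B sorts
def pvE (data : List (String × List (Int × Int))) : List (Int × Int) :=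
  (List.range data.length).map (fun k : Nat => (pvYN data (k : Int), (k : Int)))

theorem pvDict_get (data : List (String × List (Int × Int)))
    (hnd : (data.map (·.1)).Nodup) (k : Nat) (hk : k < data.length) :
    (PySem.Dict.mk data).get? ((data.map (·.1)).getD k "") = some ((data.getD k ("", [])).2) := by
  induction data generalizing k with
  | nil => simp at hk
  | cons hd tl ih =>
    rcases k with _ | k
    · rw [PySem.Dict.get?_mk_cons]; simp
    · simp only [List.map_cons, List.getD_cons_succ, List.getD_cons_succ]
      rw [PySem.Dict.get?_mk_cons]
      have hklt : k < tl.length := by simpa using hk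
      have hmem : (tl.map (·.1)).getD k "" ∈ tl.map (·.1) := by
        rw [List.getD_eq_getElem _ _ (by simpa using hklt)]
        exact List.getElem_mem _
      have hne : (hd.1 == (tl.map (·.1)).getD k "") = false := by
        simp only [List.map_cons, List.nodup_cons] at hnd
        simp only [beq_eq_false_iff_ne, ne_eq]
        intro he; exact hnd.1 (he ▸ hmem)
      rw [hne]
      simp only [List.map_cons, List.nodup_cons] at hnd
      exact ih hnd.2 k hklt

theorem pvYa (data : List (String × List (Int × Int)))
    (hnd : (data.map (·.1)).Nodup) (i : Int) (h0 : 0 ≤ i) (h1 : i < (data.length : Int)) :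
    (PySem.List.pyGetD ((PySem.Dict.mk data).getD (PySem.List.pyGetD (data.map (·.1)) i "") []) 0 (0, 0)).2
      = pvYN data i := by
  have hlt : i.toNat < data.length := by omega
  have hmlt : i.toNat < (data.map (·.1)).length := by simpa using hlt
  rw [PySem.List.pyGetD_eq_getElem (data.map (·.1)) "" h0 (by simpa using h1)]
  have hkey : (data.map (·.1))[i.toNat]'hmlt = (data.map (·.1)).getD i.toNat "" :=
    (List.getD_eq_getElem _ _ hmlt).symm
  rw [hkey]
  unfold PySem.Dict.getD
  rw [pvDict_get data hnd i.toNat hlt]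
  simp only [Option.getD_some]
  unfold pvYN pvYs
  rw [PySem.List.pyGetD_eq_getElem _ 0 h0 (by simpa using h1)]
  rw [List.getElem_map]
  rw [List.getD_eq_getElem _ _ hlt]

theorem pvA_eq (data : List (String × List (Int × Int))) (h : Pre_merge_keys data) :
    merge_keys data = (pvF data).map (pvG data) := by
  obtain ⟨hnd, -⟩ := h
  unfold merge_keys
  simp only [PySem.Dict.keys_mk]
  rw [show ((data.map (·.1)).length : Int) = (data.length : Int) by simp]
  rw [PySem.List.pyRange_zero_natCast, List.foldl_map]
  have hstep : ∀ (acc : List (String × String)) (k : Nat), k ∈ List.range data.length →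
      (PySem.List.pyRange ((k : Int) + 1) (data.length : Int) 1).foldl (fun acc j =>
        if |(PySem.List.pyGetD ((PySem.Dict.mk data).getD (PySem.List.pyGetD (data.map (·.1)) (k : Int) "") []) 0 (0, 0)).2
            - (PySem.List.pyGetD ((PySem.Dict.mk data).getD (PySem.List.pyGetD (data.map (·.1)) j "") []) 0 (0, 0)).2| < 6
        then acc ++ [(PySem.List.pyGetD (data.map (·.1)) (k : Int) "", PySem.List.pyGetD (data.map (·.1)) j "")] else acc) acc
      = acc ++ ((PySem.List.pyRange ((k : Int) + 1) (data.length : Int) 1).filter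
          (fun j => decide (|pvYN data (k : Int) - pvYN data j| < 6))).map (fun j => pvG data ((k : Int), j)) := by
    intro acc k hk
    rw [PySem.List.foldl_append_ite (p := fun j =>
        |(PySem.List.pyGetD ((PySem.Dict.mk data).getD (PySem.List.pyGetD (data.map (·.1)) (k : Int) "") []) 0 (0, 0)).2
          - (PySem.List.pyGetD ((PySem.Dict.mk data).getD (PySem.List.pyGetD (data.map (·.1)) j "") []) 0 (0, 0)).2| < 6)
        (f := fun j => (PySem.List.pyGetD (data.map (·.1)) (k : Int) "", PySem.List.pyGetD (data.map (·.1)) j ""))]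
    have hfil : List.filter (fun j => decide
        (|(PySem.List.pyGetD ((PySem.Dict.mk data).getD (PySem.List.pyGetD (data.map (·.1)) (k : Int) "") []) 0 (0, 0)).2
          - (PySem.List.pyGetD ((PySem.Dict.mk data).getD (PySem.List.pyGetD (data.map (·.1)) j "") []) 0 (0, 0)).2| < 6))
        (PySem.List.pyRange ((k : Int) + 1) (data.length : Int) 1)
        = List.filter (fun j => decide (|pvYN data (k : Int) - pvYN data j| < 6))
          (PySem.List.pyRange ((k : Int) + 1) (data.length : Int) 1) := by
      apply List.filter_congr
      intro j hj
      rw [PySem.List.mem_pyRange_one] at hj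
      rw [List.mem_range] at hk
      have hkb : (k : Int) < (data.length : Int) := by exact_mod_cast hk
      rw [pvYa data hnd (k : Int) (by omega) hkb, pvYa data hnd j (by omega) (by omega)]
    rw [hfil]
    rfl
  rw [PySem.List.foldl_congr_mem _ _ _ _ hstep]
  rw [PySem.List.foldl_append_eq_flatMap
      (g := fun k : Nat => ((PySem.List.pyRange ((k : Int) + 1) (data.length : Int) 1).filter
        (fun j => decide (|pvYN data (k : Int) - pvYN data j| < 6))).map (fun j => pvG data ((k : Int), j)))]
  rw [List.nil_append]
  unfold pvF pvAllPairs
  rw [List.filter_flatMap, List.map_flatMap]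
  rw [PySem.List.pyRange_zero_natCast, List.flatMap_map]
  apply List.flatMap_congr
  intro k _
  rw [List.filter_map, List.map_map]
  rfl

-- sorted2 with fst/snd keys is sorting by the lexicographic order on the pair
theorem pvSorted2_eq (xs : List (Int × Int)) :
    PySem.List.sorted2 xs Prod.fst Prod.snd = PySem.List.sorted xs (fun p => toLex p) := by
  have hfun : (fun (a b : Int × Int) => decide (a.1 < b.1) || (!decide (b.1 < a.1) && decide (a.2 < b.2)))
      = (fun (a b : Int × Int) => decide (toLex a < toLex b)) := by
    funext a b
    by_cases h1 : a.1 < b.1 <;> by_cases h2 : b.1 < a.1 <;> by_cases h3 : a.2 < b.2 <;>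
      simp [h1, h2, h3, Prod.Lex.lt_iff] <;> omega
  rw [PySem.List.sorted_eq_foldl_insertBy]
  show List.foldl (fun acc x => PySem.List.insertBy
      (fun a b => decide (a.1 < b.1) || (!decide (b.1 < a.1) && decide (a.2 < b.2))) x acc) [] xs = _
  rw [hfun]

theorem pvPyRange_pairwise (a b : Int) : (PySem.List.pyRange a b 1).Pairwise (· < ·) := by
  rw [PySem.List.pyRange_of_pos a b one_pos]
  rw [List.pairwise_map]
  exact List.pairwise_lt_range.imp (fun h => by omega)

theorem pvMem_allPairs (n : Int) (p : Int × Int) :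
    p ∈ pvAllPairs n ↔ 0 ≤ p.1 ∧ p.1 < p.2 ∧ p.2 < n := by
  unfold pvAllPairs
  rw [List.mem_flatMap]
  constructor
  · rintro ⟨i, hi, hp⟩
    rw [PySem.List.mem_pyRange_one] at hi
    rw [List.mem_map] at hp
    obtain ⟨j, hj, rfl⟩ := hp
    rw [PySem.List.mem_pyRange_one] at hj
    exact ⟨hi.1, by omega, hj.2⟩
  · rintro ⟨h0, h12, h2n⟩
    refine ⟨p.1, ?_, ?_⟩
    · rw [PySem.List.mem_pyRange_one]; omega
    · rw [List.mem_map]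
      exact ⟨p.2, by rw [PySem.List.mem_pyRange_one]; omega, rfl⟩

theorem pvPairwise_allPairs (n : Int) :
    (pvAllPairs n).Pairwise (fun a b => toLex a < toLex b) := by
  unfold pvAllPairs
  rw [List.pairwise_flatMap]
  constructor
  · intro i _
    rw [List.pairwise_map]
    refine (pvPyRange_pairwise (i + 1) n).imp ?_
    intro a b hab
    exact Prod.Lex.lt_iff.mpr (Or.inr ⟨rfl, hab⟩)
  · refine (pvPyRange_pairwise 0 n).imp ?_
    intro a b hab x hx y hy
    rw [List.mem_map] at hx hy
    obtain ⟨j1, -, rfl⟩ := hx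
    obtain ⟨j2, -, rfl⟩ := hy
    exact Prod.Lex.lt_iff.mpr (Or.inl hab)

theorem pvE_mem (data : List (String × List (Int × Int))) (e : Int × Int) :
    e ∈ pvE data ↔ ∃ k : Nat, k < data.length ∧ e = (pvYN data (k : Int), (k : Int)) := by
  unfold pvE
  rw [List.mem_map]
  constructor
  · rintro ⟨k, hk, rfl⟩; exact ⟨k, List.mem_range.mp hk, rfl⟩
  · rintro ⟨k, hk, rfl⟩; exact ⟨k, List.mem_range.mpr hk, rfl⟩

theorem pvE_nodup (data : List (String × List (Int × Int))) : (pvE data).Nodup := by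
  unfold pvE
  apply List.Nodup.map
  · intro a b h
    have := congrArg Prod.snd h
    simpa using this
  · exact List.nodup_range

theorem pvE_snd_nodup (data : List (String × List (Int × Int))) :
    ((pvE data).map Prod.snd).Nodup := by
  unfold pvE
  rw [List.map_map]
  apply List.Nodup.map
  · intro a b h
    simpa using h
  · exact List.nodup_range

theorem pvNorm_eq (a b : Int) : pvNorm a b = (min a b, max a b) := by
  unfold pvNorm
  split_ifs with h
  · rw [min_eq_left (le_of_lt h), max_eq_right (le_of_lt h)]
  · rw [min_eq_right (by omega), max_eq_left (by omega)]

theorem pvInner_mem (yp ip : Int) (l : List (Int × Int))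
    (hs : l.Pairwise (fun a b => a.1 ≤ b.1)) (x : Int × Int) :
    x ∈ pvInner yp ip l ↔ ∃ e ∈ l, e.1 - yp < 6 ∧ x = pvNorm ip e.2 := by
  induction l with
  | nil => simp [pvInner]
  | cons hd tl ih =>
    obtain ⟨hhd, htl⟩ := List.pairwise_cons.mp hs
    obtain ⟨y1, i1⟩ := hd
    by_cases hbr : 6 ≤ y1 - yp
    · constructor
      · intro hx; simp [pvInner, hbr] at hx
      · rintro ⟨e, he, hlt, -⟩
        rcases List.mem_cons.mp he with rfl | hmem
        · omega
        · have := hhd e hmem; simp at this; omega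
    · simp only [pvInner, if_neg hbr, List.mem_cons]
      rw [ih htl]
      constructor
      · rintro (rfl | ⟨e, he, hlt, rfl⟩)
        · exact ⟨(y1, i1), Or.inl rfl, by show y1 - yp < 6; omega, rfl⟩
        · exact ⟨e, Or.inr he, hlt, rfl⟩
      · rintro ⟨e, rfl | hmem, hlt, rfl⟩
        · exact Or.inl rfl
        · exact Or.inr ⟨e, hmem, hlt, rfl⟩

theorem pvOuter_mem (l : List (Int × Int))
    (hs : l.Pairwise (fun a b => a.1 ≤ b.1)) (x : Int × Int) :
    x ∈ pvOuter l ↔ ∃ a b, [a, b].Sublist l ∧ b.1 - a.1 < 6 ∧ x = pvNorm a.2 b.2 := by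
  induction l with
  | nil =>
    simp only [pvOuter, List.not_mem_nil, false_iff]
    rintro ⟨a, b, hsub, -, -⟩
    simpa using hsub.length_le
  | cons hd tl ih =>
    obtain ⟨hhd, htl⟩ := List.pairwise_cons.mp hs
    simp only [pvOuter, List.mem_append]
    rw [pvInner_mem hd.1 hd.2 tl htl, ih htl]
    constructor
    · rintro (⟨e, he, hlt, rfl⟩ | ⟨a, b, hsub, hlt, rfl⟩)
      · exact ⟨hd, e, List.cons_sublist_cons.mpr (List.singleton_sublist.mpr he), hlt, rfl⟩
      · exact ⟨a, b, hsub.cons hd, hlt, rfl⟩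
    · rintro ⟨a, b, hsub, hlt, rfl⟩
      rcases List.sublist_cons_iff.mp hsub with h | ⟨r, hr, hrs⟩
      · exact Or.inr ⟨a, b, h, hlt, rfl⟩
      · obtain ⟨rfl, rfl⟩ : a = hd ∧ r = [b] := by
          injection hr with h1 h2
          exact ⟨h1, h2.symm⟩
        exact Or.inl ⟨b, List.singleton_sublist.mp hrs, hlt, rfl⟩

theorem pvInner_comp (yp ip : Int) (l : List (Int × Int)) (x : Int × Int)
    (hx : x ∈ pvInner yp ip l) : ∃ e ∈ l, x = pvNorm ip e.2 := by
  induction l with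
  | nil => simp [pvInner] at hx
  | cons hd tl ih =>
    obtain ⟨y1, i1⟩ := hd
    by_cases hbr : 6 ≤ y1 - yp
    · simp [pvInner, hbr] at hx
    · simp only [pvInner, if_neg hbr, List.mem_cons] at hx
      rcases hx with rfl | hx
      · exact ⟨(y1, i1), List.mem_cons_self, rfl⟩
      · obtain ⟨e, he, hee⟩ := ih hx
        exact ⟨e, List.mem_cons_of_mem _ he, hee⟩

theorem pvInner_nodup (yp ip : Int) (l : List (Int × Int))
    (hip : ip ∉ l.map Prod.snd) (hnd : (l.map Prod.snd).Nodup) :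
    (pvInner yp ip l).Nodup := by
  induction l with
  | nil => simp [pvInner]
  | cons hd tl ih =>
    obtain ⟨y1, i1⟩ := hd
    simp only [List.map_cons, List.nodup_cons] at hnd
    rw [List.map_cons, List.mem_cons] at hip
    have hip' : ip ≠ i1 ∧ ip ∉ tl.map Prod.snd := by
      constructor
      · intro h; exact hip (Or.inl h)
      · intro h; exact hip (Or.inr h)
    by_cases hbr : 6 ≤ y1 - yp
    · simp [pvInner, hbr]
    · simp only [pvInner, if_neg hbr, List.nodup_cons]
      refine ⟨?_, ih hip'.2 hnd.2⟩
      intro hmem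
      obtain ⟨e, he, hee⟩ := pvInner_comp yp ip tl _ hmem
      have he2 : e.2 ∈ tl.map Prod.snd := List.mem_map.mpr ⟨e, he, rfl⟩
      rw [pvNorm_eq, pvNorm_eq] at hee
      have h1 : i1 = e.2 := by
        have hip1 : ip ≠ i1 := hip'.1
        have hip2 : ip ≠ e.2 := fun h => hip'.2 (h ▸ he2)
        have := congrArg Prod.fst hee
        have := congrArg Prod.snd hee
        simp at *
        omega
      exact (h1 ▸ hnd.1) he2

theorem pvOuter_comp (l : List (Int × Int)) (x : Int × Int) (hx : x ∈ pvOuter l) :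
    ∃ a b, a ∈ l.map Prod.snd ∧ b ∈ l.map Prod.snd ∧ x = pvNorm a b := by
  induction l with
  | nil => simp [pvOuter] at hx
  | cons hd tl ih =>
    simp only [pvOuter, List.mem_append] at hx
    rcases hx with hx | hx
    · obtain ⟨e, he, rfl⟩ := pvInner_comp hd.1 hd.2 tl _ hx
      exact ⟨hd.2, e.2, by simp, List.mem_map.mpr ⟨e, List.mem_cons_of_mem _ he, rfl⟩, rfl⟩
    · obtain ⟨a, b, ha, hb, rfl⟩ := ih hx
      exact ⟨a, b, by simp [ha], by simp [hb], rfl⟩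

theorem pvOuter_nodup (l : List (Int × Int)) (hnd : (l.map Prod.snd).Nodup) :
    (pvOuter l).Nodup := by
  induction l with
  | nil => simp [pvOuter]
  | cons hd tl ih =>
    simp only [List.map_cons, List.nodup_cons] at hnd
    refine List.Nodup.append (pvInner_nodup hd.1 hd.2 tl hnd.1 hnd.2) (ih hnd.2) ?_
    intro x hx1 hx2
    obtain ⟨e, he, rfl⟩ := pvInner_comp hd.1 hd.2 tl _ hx1
    obtain ⟨a, b, ha, hb, heq⟩ := pvOuter_comp tl _ hx2
    rw [pvNorm_eq, pvNorm_eq] at heq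
    have h1 := congrArg Prod.fst heq
    have h2 := congrArg Prod.snd heq
    simp at h1 h2
    have : hd.2 = a ∨ hd.2 = b := by omega
    rcases this with rfl | rfl
    · exact hnd.1 ha
    · exact hnd.1 hb

theorem pvPair_sublist {α : Type} {a b : α} {l : List α}
    (ha : a ∈ l) (hb : b ∈ l) (hne : a ≠ b) :
    [a, b].Sublist l ∨ [b, a].Sublist l := by
  induction l with
  | nil => simp at ha
  | cons c tl ih =>
    rcases List.mem_cons.mp ha with rfl | ha'
    · have hb' : b ∈ tl := by
        rcases List.mem_cons.mp hb with rfl | h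
        · exact absurd rfl hne
        · exact h
      exact Or.inl (List.cons_sublist_cons.mpr (List.singleton_sublist.mpr hb'))
    · rcases List.mem_cons.mp hb with rfl | hb'
      · exact Or.inr (List.cons_sublist_cons.mpr (List.singleton_sublist.mpr ha'))
      · exact (ih ha' hb').imp (List.Sublist.cons c) (List.Sublist.cons c)

theorem pvEnumMap {α : Type} (g : α → Int) (xs : List α) (s : Int) :
    (PySem.List.enumerate xs s).map (fun p => (g p.2, p.1))
      = (List.range xs.length).map (fun k => ((xs.map g).getD k 0, s + (k : Int))) := by
  induction xs generalizing s with
  | nil => simp [PySem.List.enumerate]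
  | cons x t ih =>
    rw [show PySem.List.enumerate (x :: t) s = (s, x) :: PySem.List.enumerate t (s + 1) from rfl]
    rw [List.map_cons, ih (s + 1)]
    rw [show (x :: t).length = t.length + 1 from rfl, List.range_succ_eq_map]
    rw [List.map_cons, List.map_map]
    congr 1
    · simp
    · apply List.map_congr_left
      intro k hk
      show ((List.map g t).getD k 0, s + 1 + (k : Int))
          = ((List.map g (x :: t)).getD (k + 1) 0, s + ((k + 1 : Nat) : Int))
      rw [List.map_cons, List.getD_cons_succ]
      congr 1
      push_cast; ring

theorem pvB_eq (data : List (String × List (Int × Int))) :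
    merge_keys_alt data = (pvF data).map (pvG data) := by
  simp only [merge_keys_alt, PySem.Dict.keys_mk]
  have hL0 : ((PySem.List.enumerate (data.map (·.2))).map
      (fun p => ((PySem.List.pyGetD p.2 0 (0, 0)).2, p.1))) = pvE data := by
    rw [pvEnumMap (fun l => (PySem.List.pyGetD l 0 (0, 0)).2) (data.map (·.2)) 0]
    unfold pvE
    rw [List.length_map]
    apply List.map_congr_left
    intro k hk
    rw [List.map_map]
    have h1 : ((data.map fun kv => (PySem.List.pyGetD kv.2 0 (0, 0)).2).getD k 0)
        = pvYN data (k : Int) := by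
      unfold pvYN pvYs
      rw [PySem.List.pyGetD_natCast]
    refine Prod.ext ?_ ?_
    · exact h1
    · show 0 + (k : Int) = (k : Int); ring
  rw [hL0]
  have hperm : (PySem.List.sorted2 (pvE data) Prod.fst Prod.snd).Perm (pvE data) := by
    rw [pvSorted2_eq]; exact PySem.List.sorted_perm _ _ _
  have hpwle : (PySem.List.sorted2 (pvE data) Prod.fst Prod.snd).Pairwise
      (fun a b => toLex a ≤ toLex b) := by
    rw [pvSorted2_eq]; exact PySem.List.sorted_pairwise _ _
  have hfst : (PySem.List.sorted2 (pvE data) Prod.fst Prod.snd).Pairwise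
      (fun a b => a.1 ≤ b.1) := by
    refine hpwle.imp ?_
    intro a b h
    rcases Prod.Lex.le_iff.mp h with h | ⟨h1, -⟩
    · exact le_of_lt h
    · exact le_of_eq h1
  have hOnd : (PySem.List.sorted2 (pvE data) Prod.fst Prod.snd).Nodup :=
    hperm.nodup_iff.mpr (pvE_nodup data)
  have hsnd : ((PySem.List.sorted2 (pvE data) Prod.fst Prod.snd).map Prod.snd).Nodup :=
    ((hperm.map Prod.snd).nodup_iff).mpr (pvE_snd_nodup data)
  have hFpw : (pvF data).Pairwise (fun a b => toLex a < toLex b) :=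
    (pvPairwise_allPairs _).filter _
  have hFnd : (pvF data).Nodup := by
    refine hFpw.imp ?_
    intro a b h hab
    rw [hab] at h
    exact lt_irrefl _ h
  have hmem : ∀ x, x ∈ pvOuter (PySem.List.sorted2 (pvE data) Prod.fst Prod.snd)
      ↔ x ∈ pvF data := by
    intro x
    rw [pvOuter_mem _ hfst x]
    unfold pvF
    rw [List.mem_filter, pvMem_allPairs, decide_eq_true_eq]
    constructor
    · rintro ⟨a, b, hsub, hlt, rfl⟩
      have ha := hperm.mem_iff.mp (hsub.subset (show a ∈ [a, b] by simp))
      have hb := hperm.mem_iff.mp (hsub.subset (show b ∈ [a, b] by simp))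
      obtain ⟨i, hi, rfl⟩ := (pvE_mem data a).mp ha
      obtain ⟨j, hj, rfl⟩ := (pvE_mem data b).mp hb
      have hnd2 := hsub.nodup hOnd
      rw [List.nodup_cons] at hnd2
      have hne : ((pvYN data (i : Int), (i : Int)) : Int × Int)
          ≠ (pvYN data (j : Int), (j : Int)) := by
        intro h; exact hnd2.1 (by rw [h]; simp)
      have hij : (i : Int) ≠ (j : Int) := by
        intro h; apply hne; rw [h]
      have hle : pvYN data (i : Int) ≤ pvYN data (j : Int) := by
        have hp := List.Pairwise.sublist hsub hfst
        rcases List.pairwise_cons.mp hp with ⟨h1, -⟩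
        exact h1 (pvYN data (j : Int), (j : Int)) (by simp)
      have hlt' : pvYN data (j : Int) - pvYN data (i : Int) < 6 := hlt
      rcases lt_or_gt_of_ne hij with hij' | hij'
      · have hn : pvNorm (i : Int) (j : Int) = ((i : Int), (j : Int)) := by
          unfold pvNorm; rw [if_pos hij']
        rw [hn]
        refine ⟨⟨by omega, hij', by show ((j : Nat) : Int) < ((data.length : Nat) : Int); exact_mod_cast hj⟩, ?_⟩
        show |pvYN data (i : Int) - pvYN data (j : Int)| < 6
        rw [abs_lt]; omega
      · have hn : pvNorm (i : Int) (j : Int) = ((j : Int), (i : Int)) := by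
          unfold pvNorm; rw [if_neg (by omega)]
        rw [hn]
        refine ⟨⟨by omega, hij', by show ((i : Nat) : Int) < ((data.length : Nat) : Int); exact_mod_cast hi⟩, ?_⟩
        show |pvYN data (j : Int) - pvYN data (i : Int)| < 6
        rw [abs_lt]; omega
    · obtain ⟨i, j⟩ := x
      rintro ⟨⟨h0, h12, h2n⟩, habs⟩
      simp only at h0 h12 h2n habs
      have h0j : (0 : Int) ≤ j := by omega
      have ha : ((pvYN data i, i) : Int × Int) ∈ pvE data := by
        refine (pvE_mem data _).mpr ⟨i.toNat, by omega, ?_⟩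
        rw [Int.toNat_of_nonneg h0]
      have hb : ((pvYN data j, j) : Int × Int) ∈ pvE data := by
        refine (pvE_mem data _).mpr ⟨j.toNat, by omega, ?_⟩
        rw [Int.toNat_of_nonneg h0j]
      have haO := hperm.mem_iff.mpr ha
      have hbO := hperm.mem_iff.mpr hb
      have hne : ((pvYN data i, i) : Int × Int) ≠ (pvYN data j, j) := by
        intro h
        have := congrArg Prod.snd h
        simp only at this
        omega
      rcases pvPair_sublist haO hbO hne with hsub | hsub
      · refine ⟨_, _, hsub, ?_, ?_⟩
        · show pvYN data j - pvYN data i < 6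
          rw [abs_lt] at habs; omega
        · show ((i, j) : Int × Int) = pvNorm i j
          unfold pvNorm; rw [if_pos h12]
      · refine ⟨_, _, hsub, ?_, ?_⟩
        · show pvYN data i - pvYN data j < 6
          rw [abs_lt] at habs; omega
        · show ((i, j) : Int × Int) = pvNorm j i
          unfold pvNorm; rw [if_neg (by omega)]
  have hPF : (pvF data).Perm (pvOuter (PySem.List.sorted2 (pvE data) Prod.fst Prod.snd)) :=
    (List.perm_ext_iff_of_nodup hFnd (pvOuter_nodup _ hsnd)).mpr (fun a => (hmem a).symm)
  have hsorted : PySem.List.sorted2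
      (pvOuter (PySem.List.sorted2 (pvE data) Prod.fst Prod.snd)) Prod.fst Prod.snd = pvF data := by
    rw [pvSorted2_eq]
    exact PySem.List.sorted_eq_of_perm_of_pairwise_lt _ _ _ hPF hFpw
  rw [hsorted]
  rfl

-- ===== VERDICT (by name: the statement is the Claim_ definition above) =====
theorem merge_keys_spec : Claim_equal_merge_keys := by
  intro data _ hpre
  unfold Spec_merge_keys
  rw [pvA_eq data hpre, pvB_eq data]
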